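-- pv_equiv track=rewrite | github.com/pypi-data/pypi-mirror-400 | packages/k3fmt/k3fmt-0.1.3.tar.gz/k3fmt-0.1.3/strutil.py | _findquote
-- ===== SOURCE A (Python) =====
-- def _findquote(line, quote):
--     if len(quote) == 0:
--         return -1, -1, []
--
--     i = 0
--     n = len(line)
--     escape = []
--     while i < n:
--         if line[i] == "\\":
--             escape.append(i)
--             i += 2
--             continue
--
--         if line[i] in quote:
--             quote_s = i - len(escape)
--
--             j = i
--             i += 1
--             while i < n and line[i] != line[j]:
--                 if line[i] == "\\":
--                     escape.append(i)
--                     i += 2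
--                     continue
--
--                 i += 1
--
--             if i < n:
--                 quote_e = i - len(escape)
--                 return quote_s, quote_e, escape
--             else:
--                 return quote_s, -1, escape
--
--         i += 1
--
--     return -1, -1, escape
-- ===== SOURCE B (Python) =====
-- def _findquote(line, quote):
--     if len(quote) == 0:
--         return -1, -1, []
--
--     i = 0
--     n = len(line)
--     escape = []
--     state = None  # None = outside quote; (qchar, quote_s) = inside quote
--     while i < n:
--         c = line[i]
--         if c == "\\":
--             escape.append(i)
--             i += 2
--             continue
--         if state is None:
--             if c in quote:
--                 state = (c, i - len(escape))
--         elif c == state[0]: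
--             return state[1], i - len(escape), escape
--         i += 1
--
--     if state is None:
--         return -1, -1, escape
--     return state[1], -1, escape
-- ===== Notes on version B (the rewrite author's own statement) =====
-- stated objective: alternative
-- what changed: Replaced A's nested while loops (outer scan plus a dedicated inner loop hunting for the closing quote) by a single flat state-machine pass whose state is None or (qchar, quote_s).
import Mathlib
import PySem

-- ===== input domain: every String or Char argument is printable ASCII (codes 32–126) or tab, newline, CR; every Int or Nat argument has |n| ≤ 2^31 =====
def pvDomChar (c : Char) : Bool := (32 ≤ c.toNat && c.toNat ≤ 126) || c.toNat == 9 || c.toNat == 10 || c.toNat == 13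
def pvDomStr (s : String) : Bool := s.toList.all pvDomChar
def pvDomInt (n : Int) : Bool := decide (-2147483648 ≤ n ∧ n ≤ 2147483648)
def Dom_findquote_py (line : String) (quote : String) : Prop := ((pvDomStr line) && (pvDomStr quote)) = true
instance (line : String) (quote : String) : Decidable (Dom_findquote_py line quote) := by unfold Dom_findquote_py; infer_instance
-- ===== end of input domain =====

-- B replaces A's nested while loops by a single flat state-machine pass (objective: alternative decomposition, same cost).

-- ===== PORT A =====
-- inner 'while i < n and line[i] != line[j]' loop of A: returns the final i together with the escape list
def findquoteInner (cs : List Char) (qc : Char) (i : Nat) (esc : List Int) : Nat × List Int :=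
  if h : i < cs.length then
    if cs[i] == qc then (i, esc)
    else if cs[i] == '\\' then findquoteInner cs qc (i + 2) (esc ++ [(i : Int)])
    else findquoteInner cs qc (i + 1) esc
  else (i, esc)
termination_by cs.length - i

-- outer 'while i < n' loop of A
def findquoteOuter (cs : List Char) (quote : List Char) (i : Nat) (esc : List Int) :
    Int × Int × List Int :=
  if h : i < cs.length then
    if cs[i] == '\\' then findquoteOuter cs quote (i + 2) (esc ++ [(i : Int)])
    else if quote.contains cs[i] then
      let quoteS : Int := (i : Int) - esc.length
      let r := findquoteInner cs cs[i] (i + 1) esc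
      if r.1 < cs.length then (quoteS, (r.1 : Int) - r.2.length, r.2)
      else (quoteS, -1, r.2)
    else findquoteOuter cs quote (i + 1) esc
  else (-1, -1, esc)
termination_by cs.length - i

def findquote_py (line : String) (quote : String) : Int × Int × List Int :=
  if quote.toList.length == 0 then (-1, -1, [])
  else findquoteOuter line.toList quote.toList 0 []

-- ===== PORT B =====
-- single flat loop; state = none (outside a quote) or some (qchar, quote_s) (inside)
def findquoteFlat (cs : List Char) (quote : List Char) (i : Nat)
    (st : Option (Char × Int)) (esc : List Int) : Int × Int × List Int :=
  if h : i < cs.length then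
    if cs[i] == '\\' then findquoteFlat cs quote (i + 2) st (esc ++ [(i : Int)])
    else
      match st with
      | none =>
          if quote.contains cs[i] then
            findquoteFlat cs quote (i + 1) (some (cs[i], (i : Int) - esc.length)) esc
          else findquoteFlat cs quote (i + 1) none esc
      | some (qc, s) =>
          if cs[i] == qc then (s, (i : Int) - esc.length, esc)
          else findquoteFlat cs quote (i + 1) (some (qc, s)) esc
  else
    match st with
    | none => (-1, -1, esc)
    | some (_, s) => (s, -1, esc)
termination_by cs.length - i

def findquote_py_alt (line : String) (quote : String) : Int × Int × List Int :=
  if quote.toList.length == 0 then (-1, -1, [])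
  else findquoteFlat line.toList quote.toList 0 none []

-- ===== PRECONDITION & SPEC =====
def Spec_findquote_py (line : String) (quote : String) (out : Int × Int × List Int) : Prop := out = findquote_py_alt line quote
instance (line : String) (quote : String) (out : Int × Int × List Int) : Decidable (Spec_findquote_py line quote out) := by unfold Spec_findquote_py; infer_instance

-- ===== CLAIM (what is proved, stated in full; the proofs are below) =====
def Claim_equal_findquote_py : Prop := ∀ (line : String) (quote : String), Dom_findquote_py line quote → Spec_findquote_py line quote (findquote_py line quote)

-- ===== LEMMAS AND PROOFS =====

-- in the in-quote state, the flat loop computes exactly what A's inner loop + return computes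
theorem flat_inQuote_eq (cs : List Char) (quote : List Char) (qc : Char) (s : Int)
    (hqc : qc ≠ '\\') :
    ∀ (k i : Nat) (esc : List Int), cs.length - i ≤ k →
      findquoteFlat cs quote i (some (qc, s)) esc =
        (let r := findquoteInner cs qc i esc
         if r.1 < cs.length then (s, (r.1 : Int) - r.2.length, r.2) else (s, -1, r.2)) := by
  intro k
  induction k with
  | zero =>
    intro i esc hk
    have hn : ¬ i < cs.length := by omega
    rw [findquoteFlat, findquoteInner]
    simp [hn]
  | succ k ih =>
    intro i esc hk
    rw [findquoteFlat, findquoteInner]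
    by_cases hi : i < cs.length
    · simp only [hi, dif_pos]
      by_cases hq : cs[i] == qc
      · have hbs : ¬ (cs[i] == '\\') := by
          simp only [beq_iff_eq] at hq ⊢; simpa [hq] using hqc
        simp [hq, hbs, hi]
      · by_cases hbs : cs[i] == '\\'
        · rw [ih (i + 2) (esc ++ [(i : Int)]) (by omega)]
          simp [hbs, hq]
        · rw [ih (i + 1) esc (by omega)]
          simp [hbs, hq]
    · simp [hi]

-- in the outside-quote state, the flat loop computes exactly what A's outer loop computes
theorem flat_none_eq (cs : List Char) (quote : List Char) :
    ∀ (k i : Nat) (esc : List Int), cs.length - i ≤ k →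
      findquoteFlat cs quote i none esc = findquoteOuter cs quote i esc := by
  intro k
  induction k with
  | zero =>
    intro i esc hk
    have hn : ¬ i < cs.length := by omega
    rw [findquoteFlat, findquoteOuter]
    simp [hn]
  | succ k ih =>
    intro i esc hk
    rw [findquoteFlat, findquoteOuter]
    by_cases hi : i < cs.length
    · simp only [hi, dif_pos]
      by_cases hbs : cs[i] == '\\'
      · simp only [hbs, if_pos]
        rw [ih (i + 2) (esc ++ [(i : Int)]) (by omega)]
      · by_cases hq : quote.contains cs[i]
        · have hne : cs[i] ≠ '\\' := by simpa [beq_iff_eq] using hbs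
          rw [flat_inQuote_eq cs quote cs[i] ((i : Int) - esc.length) hne
              (cs.length - (i + 1)) (i + 1) esc (by omega)]
          have hm : cs[i] ∈ quote := by simpa using hq
          simp [hbs, hm]
        · rw [ih (i + 1) esc (by omega)]
          have hm : cs[i] ∉ quote := by simpa using hq
          simp [hbs, hm]
    · simp [hi]

-- ===== VERDICT (by name: the statement is the Claim_ definition above) =====
theorem findquote_py_spec : Claim_equal_findquote_py := by
  intro line quote _
  unfold Spec_findquote_py findquote_py findquote_py_alt
  rw [flat_none_eq line.toList quote.toList line.toList.length 0 [] (by omega)]
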